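-- pv_equiv track=rewrite | github.com/jxmai/Online-List-Update | algs/static_opt.py | serve_accesses
-- ===== SOURCE A (Python) =====
-- import collections as c
--
-- def serve_accesses(sequence, working_list):
--     total_cost = 0
--     total_cost_tracker = []
--     counts = c.Counter(sequence)
--
--     insert_index = 0
--     # order by frequency
--     for i in counts.most_common():
--         item_index = working_list.index(i[0])  # i = (item, frequency)
--         # number of switches
--         assert item_index >= insert_index
--         total_cost += item_index - insert_index
--         working_list.insert(insert_index, working_list.pop(item_index))
--         insert_index += 1
--
--     total_cost_tracker.append(total_cost)
--     # check if ordered correctly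
--     # assert working_list == [i[0] for i in counts.most_common()]
--
--     for s in sequence:
--         total_cost += working_list.index(s) + 1
--         total_cost_tracker.append(total_cost)
--
--     return working_list, total_cost, total_cost_tracker
-- ===== SOURCE B (Python) =====
-- import collections as c
--
-- def serve_accesses(sequence, working_list):
--     counts = c.Counter(sequence)
--     order = [item for item, _ in counts.most_common()]
--     # closed-form reorder cost from first positions: each promoted item pays its
--     # original first position minus the number of higher-priority items that sat
--     # before it (an inversion-style count), instead of simulating pops/inserts
--     fps = [working_list.index(t) for t in order]
--     reorder = 0
--     earlier = []
--     for f in fps: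
--         reorder += f - sum(1 for g in earlier if g < f)
--         earlier.append(f)
--     # tail = working_list with the promoted first occurrences deleted by position
--     pos = set(fps)
--     tail = [x for p, x in enumerate(working_list) if p not in pos]
--     rank = {t: r for r, t in enumerate(order)}
--     working_list[:] = order + tail   # same in-place reordering as A
--     cost = reorder
--     tracker = [reorder]
--     for s in sequence:
--         cost += rank[s] + 1
--         tracker.append(cost)
--     return working_list, cost, tracker
-- ===== Notes on version B (the rewrite author's own statement) =====
-- stated objective: alternative
-- what changed: B replaces A's in-place move-to-front simulation (repeated list.index/pop/insert on the mutating list) by a closed combinatorial formula: each promoted item's cost is its first position in the original list minus an inversion-style count of higher-priority items sitting before it, the reordered list is built as promoted-order ++ positionally-filtered tail, and accesses are charged through a rank dictionary.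
import Mathlib
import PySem

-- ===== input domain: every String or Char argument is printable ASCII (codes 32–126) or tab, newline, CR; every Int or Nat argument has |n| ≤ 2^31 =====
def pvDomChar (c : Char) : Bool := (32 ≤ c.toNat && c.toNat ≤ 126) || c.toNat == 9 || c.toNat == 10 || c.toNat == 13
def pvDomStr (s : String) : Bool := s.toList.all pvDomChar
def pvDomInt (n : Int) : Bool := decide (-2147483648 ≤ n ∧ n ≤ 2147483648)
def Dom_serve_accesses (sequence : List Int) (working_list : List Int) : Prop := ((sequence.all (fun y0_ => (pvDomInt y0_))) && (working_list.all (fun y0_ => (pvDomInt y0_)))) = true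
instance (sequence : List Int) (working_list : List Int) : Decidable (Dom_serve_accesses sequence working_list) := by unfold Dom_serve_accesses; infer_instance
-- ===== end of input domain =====

-- B computes the reorder cost by a closed combinatorial formula over the first positions of the
-- promoted items (position minus inversion-style count of earlier-promoted items sitting before it)
-- and assembles the reordered list as order ++ positional-filtered tail, instead of A's in-place
-- insert/pop simulation; accesses are charged through a rank dictionary instead of a list scan.
-- Both Pythons also reorder working_list in place the same way; equivalence is about the RETURN value.

-- ===== PORT A =====
-- loop body of A's reorder loop: state (working_list, total_cost, insert_index)
def stepA (st : List Int × Int × Int) (i : Int × Int) : List Int × Int × Int :=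
  match PySem.List.index? st.1 i.1 with
  | none => st            -- ValueError in Python: excluded by Pre_
  | some itemIndex =>
    match PySem.List.pop? st.1 (itemIndex : Int) with
    | none => st
    | some r => (PySem.List.insert r.2 st.2.2 r.1, st.2.1 + (itemIndex : Int) - st.2.2, st.2.2 + 1)

-- loop body of A's access loop: state (total_cost, total_cost_tracker)
def accA (wl : List Int) (st : Int × List Int) (s : Int) : Int × List Int :=
  match PySem.List.index? wl s with
  | none => st            -- ValueError in Python: excluded by Pre_
  | some j => (st.1 + (j : Int) + 1, st.2 ++ [st.1 + (j : Int) + 1])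

def serve_accesses (sequence : List Int) (working_list : List Int) : List Int × Int × List Int :=
  let counts := PySem.Dict.counter sequence
  -- counts.most_common() = sorted(counts.items(), key=itemgetter(1), reverse=True)
  let st := (PySem.List.sorted counts.items (fun p => p.2) true).foldl stepA (working_list, 0, 0)
  let st2 := sequence.foldl (accA st.1) (st.2.1, [st.2.1])
  (st.1, st2.1, st2.2)

-- ===== PORT B =====
-- working_list.index(t) as an Int (ValueError = missing key: excluded by Pre_)
def fpIntB (wl : List Int) (t : Int) : Int :=
  match PySem.List.index? wl t with
  | none => 0
  | some f => (f : Int)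

-- body of B's reorder-cost loop: state (reorder, earlier); 'sum(1 for g in earlier if g < f)' is a countP
def costStep (st : Int × List Int) (f : Int) : Int × List Int :=
  (st.1 + (f - (st.2.countP (fun g => decide (g < f)) : Int)), st.2 ++ [f])

-- body of B's access loop: state (cost, tracker)
def accB (rank : PySem.Dict Int Int) (st : Int × List Int) (s : Int) : Int × List Int :=
  match rank.get? s with
  | none => st            -- KeyError in Python: excluded by Pre_
  | some k => (st.1 + k + 1, st.2 ++ [st.1 + k + 1])

def serve_accesses_alt (sequence : List Int) (working_list : List Int) : List Int × Int × List Int :=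
  let counts := PySem.Dict.counter sequence
  let order := (PySem.List.sorted counts.items (fun p => p.2) true).map (·.1)
  let fps := order.map (fpIntB working_list)
  let reorder := (fps.foldl costStep (0, [])).1
  let pos := PySem.Set.ofList fps
  let tail := ((PySem.List.enumerate working_list).filter (fun q => !(PySem.Set.contains pos q.1))).map (·.2)
  let rank := (PySem.List.enumerate order).foldl (fun d q => d.insert q.2 q.1) PySem.Dict.empty
  let st2 := sequence.foldl (accB rank) (reorder, [reorder])
  (order ++ tail, st2.1, st2.2)

-- ===== PRECONDITION & SPEC =====
-- Pre_ excludes exactly the inputs where A raises ValueError: some accessed item missing from working_list.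
def Pre_serve_accesses (sequence : List Int) (working_list : List Int) : Prop :=
  ∀ s ∈ sequence, s ∈ working_list
instance (sequence : List Int) (working_list : List Int) : Decidable (Pre_serve_accesses sequence working_list) := by unfold Pre_serve_accesses; infer_instance

def pvWitness_serve_accesses : List Int × List Int := ([1, 2, 1], [2, 1, 3])

def Spec_serve_accesses (sequence : List Int) (working_list : List Int) (out : List Int × Int × List Int) : Prop := out = serve_accesses_alt sequence working_list
instance (sequence : List Int) (working_list : List Int) (out : List Int × Int × List Int) : Decidable (Spec_serve_accesses sequence working_list out) := by unfold Spec_serve_accesses; infer_instance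

-- ===== CLAIM (what is proved, stated in full; the proofs are below) =====
def Claim_equal_serve_accesses : Prop := ∀ (sequence : List Int) (working_list : List Int), Dom_serve_accesses sequence working_list → Pre_serve_accesses sequence working_list → Spec_serve_accesses sequence working_list (serve_accesses sequence working_list)

-- ===== LEMMAS AND PROOFS =====

-- proof-side bridge: A's in-place simulation equals a split-state loop (order, remaining, cost)
def stepB (st : List Int × List Int × Int) (p : Int × Int) : List Int × List Int × Int :=
  match PySem.List.index? st.2.1 p.1 with
  | none => st
  | some i => (st.1 ++ [p.1], (st.2.1).eraseIdx i, st.2.2 + (i : Int))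

lemma eraseIdx_left_length {α : Type} : ∀ (xs : List α) (y : α) (ys : List α),
    (xs ++ y :: ys).eraseIdx xs.length = xs ++ ys := by
  intro xs
  induction xs with
  | nil => intro y ys; simp
  | cons x xs ih => intro y ys; simp [ih]

lemma loopAB : ∀ (l : List (Int × Int)) (order rem : List Int) (cost : Int),
    (l.map (·.1)).Nodup →
    (∀ p ∈ l, p.1 ∉ order) →
    (∀ p ∈ l, p.1 ∈ order ++ rem) →
    l.foldl stepA (order ++ rem, cost, (order.length : Int))
      = ((l.foldl stepB (order, rem, cost)).1 ++ (l.foldl stepB (order, rem, cost)).2.1,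
         (l.foldl stepB (order, rem, cost)).2.2,
         (((l.foldl stepB (order, rem, cost)).1).length : Int))
    ∧ (l.foldl stepB (order, rem, cost)).1 = order ++ l.map (·.1) := by
  intro l
  induction l with
  | nil => intro order rem cost _ _ _; simp [List.foldl]
  | cons p l ih =>
    intro order rem cost hnd hno hmem
    have hpo : p.1 ∉ order := hno p (by simp)
    have hpr : p.1 ∈ rem := by
      have := hmem p (by simp); simpa [List.mem_append, hpo] using this
    obtain ⟨idx, hidx⟩ : ∃ idx, PySem.List.index? rem p.1 = some idx := by
      have := (PySem.List.index?_isSome_iff (xs := rem) (v := p.1)).2 hpr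
      exact Option.isSome_iff_exists.1 this
    obtain ⟨pre, suf, hdec, hlen, hpre⟩ := (PySem.List.index?_eq_some_iff rem p.1 idx).1 hidx
    have herase : rem.eraseIdx idx = pre ++ suf := by
      subst hdec; subst hlen
      exact eraseIdx_left_length pre p.1 suf
    have hidx' : List.idxOf? p.1 rem = some idx := by
      rw [← PySem.List.index?_eq_idxOf?]; exact hidx
    have hBstep : stepB (order, rem, cost) p = (order ++ [p.1], pre ++ suf, cost + (idx : Int)) := by
      simp [stepB, hidx', herase]
    have hAidx : PySem.List.index? (order ++ rem) p.1 = some (order.length + idx) := by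
      apply (PySem.List.index?_eq_some_iff (order ++ rem) p.1 (order.length + idx)).2
      refine ⟨order ++ pre, suf, ?_, by simp [hlen], ?_⟩
      · simp [hdec]
      · intro h
        rcases List.mem_append.1 h with h' | h'
        · exact hpo h'
        · exact hpre h'
    have hsplit : order ++ rem = (order ++ pre) ++ p.1 :: suf := by simp [hdec]
    have hlt : order.length + idx < (order ++ rem).length := by
      subst hdec hlen; simp
    have hAstep : stepA (order ++ rem, cost, (order.length : Int)) p
        = (order ++ p.1 :: (pre ++ suf), cost + (idx : Int), (order.length : Int) + 1) := by
      have hpop := PySem.List.pop?_natCast (order ++ rem) (order.length + idx) hlt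
      have hget : (order ++ rem)[order.length + idx]'hlt = p.1 := by
        obtain ⟨hk, hv, _⟩ := PySem.List.getElem_of_index?_eq_some hAidx
        exact hv
      have herase2 : (order ++ rem).eraseIdx (order.length + idx) = order ++ (pre ++ suf) := by
        rw [hsplit]
        have hl : order.length + idx = (order ++ pre).length := by simp [hlen]
        rw [hl, eraseIdx_left_length]
        simp
      rw [hget, herase2] at hpop
      have hins : PySem.List.insert (order ++ (pre ++ suf)) ((order.length : Nat) : Int) p.1
          = order ++ p.1 :: (pre ++ suf) := by
        rw [PySem.List.insert_natCast _ _ _ (by simp)]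
        simp
      simp only [stepA, hAidx, hpop, hins]
      have harith : cost + ((order.length + idx : Nat) : Int) - (order.length : Int) = cost + (idx : Int) := by
        push_cast; ring
      rw [harith]
    rw [List.map_cons] at hnd
    have hhd : p.1 ∉ l.map (·.1) := (List.nodup_cons.1 hnd).1
    have hno' : ∀ q ∈ l, q.1 ∉ order ++ [p.1] := by
      intro q hq h
      rcases List.mem_append.1 h with h' | h'
      · exact hno q (by simp [hq]) h'
      · have hne : q.1 ≠ p.1 := by
          intro he; exact hhd (he ▸ (List.mem_map.2 ⟨q, hq, rfl⟩))
        simp at h'; exact hne h'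
    have hmem' : ∀ q ∈ l, q.1 ∈ (order ++ [p.1]) ++ (pre ++ suf) := by
      intro q hq
      have := hmem q (by simp [hq])
      rw [hdec] at this
      simp at this ⊢
      tauto
    have hnd' : (l.map (·.1)).Nodup := (List.nodup_cons.1 hnd).2
    have ihr := ih (order ++ [p.1]) (pre ++ suf) (cost + (idx : Int)) hnd' hno' hmem'
    simp only [List.foldl_cons, hBstep, hAstep]
    have e1 : order ++ p.1 :: (pre ++ suf) = (order ++ [p.1]) ++ (pre ++ suf) := by simp
    have e2 : (order.length : Int) + 1 = ((order ++ [p.1]).length : Int) := by simp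
    rw [e1, e2]
    refine ⟨ihr.1, ?_⟩
    rw [ihr.2]; simp

-- the working list with the positions in S deleted, scanning from position n
def fpos (S : List Int) : Int → List Int → List Int
  | _, [] => []
  | n, x :: xs => if S.contains n then fpos S (n + 1) xs else x :: fpos S (n + 1) xs

lemma fpos_nil : ∀ (n : Int) (xs : List Int), fpos [] n xs = xs := by
  intro n xs
  induction xs generalizing n with
  | nil => rfl
  | cons x xs ih => simp [fpos, ih]

lemma fpos_congr (S S' : List Int) (h : ∀ k, (k ∈ S) ↔ (k ∈ S')) :
    ∀ (n : Int) (xs : List Int), fpos S n xs = fpos S' n xs := by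
  intro n xs
  induction xs generalizing n with
  | nil => rfl
  | cons x xs ih =>
    have : S.contains n = S'.contains n := by
      by_cases hn : n ∈ S
      · simp [hn, (h n).1 hn]
      · have hn' : n ∉ S' := fun hx => hn ((h n).2 hx)
        simp [hn, hn']
    simp only [fpos, this, ih]

lemma fpos_irrel (S : List Int) (m : Int) :
    ∀ (n : Int) (xs : List Int), m < n → fpos (S ++ [m]) n xs = fpos S n xs := by
  intro n xs
  induction xs generalizing n with
  | nil => intro _; rfl
  | cons x xs ih =>
    intro hm
    have hc : (S ++ [m]).contains n = S.contains n := by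
      simp [List.contains_eq_mem]
      omega
    simp only [fpos, hc]
    rw [ih _ (by omega)]

lemma tail_fpos (S : List Int) :
    ∀ (xs : List Int) (n : Int),
      ((PySem.List.enumerate xs n).filter (fun q => !(PySem.Set.contains S q.1))).map (·.2) = fpos S n xs := by
  intro xs
  induction xs with
  | nil => intro n; simp [PySem.List.enumerate_nil, fpos]
  | cons x xs ih =>
    intro n
    rw [PySem.List.enumerate_cons, List.filter_cons]
    by_cases hm : n ∈ S
    · have hc : (!PySem.Set.contains S ((n : Int), x).1) = false := by
        simp [PySem.Set.contains, hm]
      rw [hc]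
      simp only [Bool.false_eq_true, if_false]
      rw [ih (n + 1)]
      simp [fpos, hm]
    · have hc : (!PySem.Set.contains S ((n : Int), x).1) = true := by
        simp [PySem.Set.contains, hm]
      rw [hc, if_pos rfl, List.map_cons, ih (n + 1)]
      simp [fpos, hm]

-- counting a half-open interval of distinct ints is at most the interval length
lemma countP_interval_le (S : List Int) (hnd : S.Nodup) (n : Int) (f : Nat) :
    S.countP (fun s => decide (n ≤ s ∧ s < n + (f : Int))) ≤ f := by
  classical
  rw [List.countP_eq_length_filter]
  have hndF : (S.filter (fun s => decide (n ≤ s ∧ s < n + (f : Int)))).Nodup := hnd.filter _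
  have hsub : (S.filter (fun s => decide (n ≤ s ∧ s < n + (f : Int)))).toFinset
      ⊆ Finset.Ico n (n + (f : Int)) := by
    intro s hs
    rw [List.mem_toFinset, List.mem_filter] at hs
    rw [Finset.mem_Ico]
    exact of_decide_eq_true hs.2
  have hle := Finset.card_le_card hsub
  rw [List.toFinset_card_of_nodup hndF, Int.card_Ico] at hle
  omega

-- splitting an interval count at its left end
lemma countP_left_mem (S : List Int) (hnd : S.Nodup) (n b : Int) (hn : n ∈ S) (hb : n < b) :
    S.countP (fun s => decide (n ≤ s ∧ s < b))
      = S.countP (fun s => decide (n + 1 ≤ s ∧ s < b)) + 1 := by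
  induction S with
  | nil => simp at hn
  | cons a S ih =>
    rw [List.nodup_cons] at hnd
    simp only [List.countP_cons]
    rcases List.mem_cons.1 hn with h | h
    · subst h
      have hcongr : S.countP (fun s => decide (n ≤ s ∧ s < b))
          = S.countP (fun s => decide (n + 1 ≤ s ∧ s < b)) :=
        List.countP_congr (fun s hs => by
          have hne : s ≠ n := fun e => hnd.1 (e ▸ hs)
          simp only [decide_eq_true_eq]
          constructor <;> (intro hh; omega))
      have h1 : decide (n ≤ n ∧ n < b) = true := decide_eq_true ⟨le_refl n, hb⟩
      have h2 : decide (n + 1 ≤ n ∧ n < b) = false := decide_eq_false (by omega)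
      simp only [hcongr, h1, h2]
      simp
    · have hane : a ≠ n := fun e => hnd.1 (e ▸ h)
      have hif : decide (n ≤ a ∧ a < b) = decide (n + 1 ≤ a ∧ a < b) := by
        apply decide_eq_decide.2
        constructor <;> (intro hh; omega)
      rw [ih hnd.2 h, hif]
      omega

lemma countP_left_notmem (S : List Int) (n b : Int) (hn : n ∉ S) :
    S.countP (fun s => decide (n ≤ s ∧ s < b))
      = S.countP (fun s => decide (n + 1 ≤ s ∧ s < b)) :=
  List.countP_congr (fun s hs => by
    have hne : s ≠ n := fun e => hn (e ▸ hs)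
    simp only [decide_eq_true_eq]
    constructor <;> (intro hh; omega))

lemma fpos_step (t : Int) :
    ∀ (wl S : List Int) (n : Int) (f : Nat),
      S.Nodup → PySem.List.index? wl t = some f → (n + (f : Int)) ∉ S →
      PySem.List.index? (fpos S n wl) t
          = some (f - S.countP (fun s => decide (n ≤ s ∧ s < n + (f : Int))))
      ∧ (fpos S n wl).eraseIdx (f - S.countP (fun s => decide (n ≤ s ∧ s < n + (f : Int))))
          = fpos (S ++ [n + (f : Int)]) n wl := by
  intro wl
  induction wl with
  | nil =>
    intro S n f _ hidx _
    rw [PySem.List.index?_eq_idxOf?] at hidx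
    simp at hidx
  | cons x xs ih =>
    intro S n f hnd hidx hns
    by_cases hx : x = t
    · subst hx
      rw [PySem.List.index?_cons_self] at hidx
      obtain rfl : (0 : Nat) = f := Option.some.inj hidx
      have hn0 : n ∉ S := by simpa using hns
      have hc0 : S.countP (fun s => decide (n ≤ s ∧ s < n + ((0 : Nat) : Int))) = 0 := by
        apply List.countP_eq_zero.2
        intro s _
        simp only [decide_eq_true_eq, Nat.cast_zero, add_zero]
        omega
      have hfe : fpos S n (x :: xs) = x :: fpos S (n + 1) xs := by simp [fpos, hn0]
      have hel : n + ((0 : Nat) : Int) = n := by simp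
      have hfe2 : fpos (S ++ [n + ((0 : Nat) : Int)]) n (x :: xs) = fpos S (n + 1) xs := by
        rw [hel]
        have hmm : n ∈ S ++ [n] := by simp
        simp only [fpos, List.contains_append]
        rw [if_pos (by simp)]
        exact fpos_irrel S n (n + 1) xs (by omega)
      rw [hc0, hfe]
      refine ⟨PySem.List.index?_cons_self x (fpos S (n + 1) xs), ?_⟩
      rw [hfe2]
      rfl
    · rw [PySem.List.index?_cons_of_ne xs hx] at hidx
      cases hxs : PySem.List.index? xs t with
      | none => rw [hxs] at hidx; simp at hidx
      | some f' =>
        rw [hxs] at hidx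
        simp only [Option.map_some] at hidx
        obtain rfl : f' + 1 = f := Option.some.inj hidx
        have hcast : n + ((f' + 1 : Nat) : Int) = n + 1 + (f' : Int) := by push_cast; ring
        have hns' : (n + 1 + (f' : Int)) ∉ S := by rw [← hcast]; exact hns
        have ihr := ih S (n + 1) f' hnd hxs hns'
        have hle' := countP_interval_le S hnd (n + 1) f'
        have hPc : S.countP (fun s => decide (n ≤ s ∧ s < n + ((f' + 1 : Nat) : Int)))
            = S.countP (fun s => decide (n ≤ s ∧ s < n + 1 + (f' : Int))) :=
          List.countP_congr (fun s _ => by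
            simp only [decide_eq_true_eq]
            constructor <;> (intro hh; push_cast at hh ⊢; omega))
        by_cases hn : n ∈ S
        · have hcnt := countP_left_mem S hnd n (n + 1 + (f' : Int)) hn (by omega)
          have hfe : fpos S n (x :: xs) = fpos S (n + 1) xs := by simp [fpos, hn]
          have hfe2 : fpos (S ++ [n + ((f' + 1 : Nat) : Int)]) n (x :: xs)
              = fpos (S ++ [n + 1 + (f' : Int)]) (n + 1) xs := by
            rw [hcast]
            simp [fpos, hn]
          have hsub : f' + 1 - S.countP (fun s => decide (n ≤ s ∧ s < n + ((f' + 1 : Nat) : Int)))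
              = f' - S.countP (fun s => decide (n + 1 ≤ s ∧ s < n + 1 + (f' : Int))) := by
            rw [hPc, hcnt]
            omega
          rw [hfe, hfe2, hsub]
          exact ihr
        · have hcnt := countP_left_notmem S n (n + 1 + (f' : Int)) hn
          have hne : n ≠ n + 1 + (f' : Int) := by omega
          have hfe : fpos S n (x :: xs) = x :: fpos S (n + 1) xs := by simp [fpos, hn]
          have hfe2 : fpos (S ++ [n + ((f' + 1 : Nat) : Int)]) n (x :: xs)
              = x :: fpos (S ++ [n + 1 + (f' : Int)]) (n + 1) xs := by
            rw [hcast]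
            simp [fpos, hn, hne]
          have hsub : f' + 1 - S.countP (fun s => decide (n ≤ s ∧ s < n + ((f' + 1 : Nat) : Int)))
              = (f' - S.countP (fun s => decide (n + 1 ≤ s ∧ s < n + 1 + (f' : Int)))) + 1 := by
            rw [hPc, hcnt]
            omega
          rw [hfe, hfe2, hsub]
          refine ⟨?_, ?_⟩
          · rw [PySem.List.index?_cons_of_ne _ hx, ihr.1]
            rfl
          · rw [List.eraseIdx_cons_succ, ihr.2]

-- accumulator form of the reorder-cost fold
lemma costFold_shift : ∀ (fs : List Int) (a : Int) (S : List Int),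
    (fs.foldl costStep (a, S)).1 = a + (fs.foldl costStep (0, S)).1 := by
  intro fs
  induction fs with
  | nil => intro a S; simp
  | cons f fs ih =>
    intro a S
    simp only [List.foldl_cons, costStep]
    rw [ih, ih (0 + _)]
    ring

lemma costFold_closed (fs : List Int) (st : Int × List Int) :
    (fs.foldl costStep st).1 = st.1 + (fs.foldl costStep (0, st.2)).1 :=
  costFold_shift fs st.1 st.2

-- the split-state loop computed in closed form
lemma stepB_closed (wl : List Int) :
    ∀ (l : List (Int × Int)) (order S : List Int) (cost : Int),
      S.Nodup → (∀ s ∈ S, 0 ≤ s) →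
      (∀ p ∈ l, p.1 ∈ wl) →
      (∀ p ∈ l, fpIntB wl p.1 ∉ S) →
      (l.map (fun p => fpIntB wl p.1)).Nodup →
      l.foldl stepB (order, fpos S 0 wl, cost)
        = (order ++ l.map (·.1),
           fpos (S ++ l.map (fun p => fpIntB wl p.1)) 0 wl,
           cost + ((l.map (fun p => fpIntB wl p.1)).foldl costStep (0, S)).1) := by
  intro l
  induction l with
  | nil => intro order S cost _ _ _ _ _; simp
  | cons p l ih =>
    intro order S cost hnd hpos0 hmem hfresh hndf
    obtain ⟨f, hf⟩ : ∃ f, PySem.List.index? wl p.1 = some f :=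
      Option.isSome_iff_exists.1 ((PySem.List.index?_isSome_iff (xs := wl) (v := p.1)).2 (hmem p (by simp)))
    have hfI : fpIntB wl p.1 = (f : Int) := by unfold fpIntB; rw [hf]
    have hfnotS : (f : Int) ∉ S := by
      have := hfresh p (by simp)
      rwa [hfI] at this
    have hfS : (0 + (f : Int)) ∉ S := by simpa using hfnotS
    obtain ⟨hidx, herase⟩ := fpos_step p.1 wl S 0 f hnd hf hfS
    have hPc : S.countP (fun s => decide (0 ≤ s ∧ s < 0 + (f : Int)))
        = S.countP (fun g => decide (g < (f : Int))) :=
      List.countP_congr (fun s hs => by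
        have h0 : (0 : Int) ≤ s := hpos0 s hs
        simp only [decide_eq_true_eq]
        constructor <;> (intro hh; omega))
    have hle : S.countP (fun g => decide (g < (f : Int))) ≤ f := by
      rw [← hPc]
      exact countP_interval_le S hnd 0 f
    rw [hPc] at hidx herase
    rw [show (0 : Int) + (f : Int) = (f : Int) by ring] at herase
    have hidx' : List.idxOf? p.1 (fpos S 0 wl) = some (f - S.countP (fun g => decide (g < (f : Int)))) := by
      rw [← PySem.List.index?_eq_idxOf?]
      exact hidx
    have hcast : ((f - S.countP (fun g => decide (g < (f : Int))) : Nat) : Int)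
        = (f : Int) - (S.countP (fun g => decide (g < (f : Int))) : Int) := by omega
    have hstep : stepB (order, fpos S 0 wl, cost) p
        = (order ++ [p.1], fpos (S ++ [(f : Int)]) 0 wl,
           cost + ((f : Int) - (S.countP (fun g => decide (g < (f : Int))) : Int))) := by
      simp [stepB, hidx', herase, hcast]
    -- hypotheses for the tail
    have hnd' : (S ++ [(f : Int)]).Nodup := by
      rw [List.nodup_append_comm]
      exact List.nodup_cons.2 ⟨hfnotS, hnd⟩
    have hpos0' : ∀ s ∈ S ++ [(f : Int)], 0 ≤ s := by
      intro s hs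
      rcases List.mem_append.1 hs with h | h
      · exact hpos0 s h
      · simp at h
        omega
    have hmem' : ∀ q ∈ l, q.1 ∈ wl := fun q hq => hmem q (by simp [hq])
    rw [List.map_cons] at hndf
    have hhd : fpIntB wl p.1 ∉ l.map (fun q => fpIntB wl q.1) := (List.nodup_cons.1 hndf).1
    have hfresh' : ∀ q ∈ l, fpIntB wl q.1 ∉ S ++ [(f : Int)] := by
      intro q hq h
      rcases List.mem_append.1 h with h' | h'
      · exact hfresh q (by simp [hq]) h'
      · simp at h'
        rw [← hfI] at h'
        exact hhd (h' ▸ List.mem_map.2 ⟨q, hq, rfl⟩)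
    have hndf' : (l.map (fun q => fpIntB wl q.1)).Nodup := (List.nodup_cons.1 hndf).2
    have ihr := ih (order ++ [p.1]) (S ++ [(f : Int)])
      (cost + ((f : Int) - (S.countP (fun g => decide (g < (f : Int))) : Int)))
      hnd' hpos0' hmem' hfresh' hndf'
    rw [List.foldl_cons, hstep, ihr]
    simp only [Prod.mk.injEq, List.map_cons]
    refine ⟨by simp, ?_, ?_⟩
    · rw [hfI]
      simp [List.append_assoc]
    · rw [hfI, List.foldl_cons]
      rw [costFold_closed (l.map (fun p => fpIntB wl p.1)) (costStep (0, S) (f : Int))]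
      dsimp only [costStep]
      ring

-- the position dictionary over a Nodup order answers exactly list.index
lemma rank_get (order : List Int) (hnd : order.Nodup) (s : Int) (j : Nat)
    (hj : PySem.List.index? order s = some j) :
    ((PySem.List.enumerate order).foldl (fun d q => d.insert q.2 q.1) PySem.Dict.empty).get? s
      = some (j : Int) := by
  set rank := (PySem.List.enumerate order).foldl (fun d q => d.insert q.2 q.1) PySem.Dict.empty with hrank
  have hitems : rank.items = (PySem.List.enumerate order).map (fun q => (q.2, q.1)) := by
    rw [hrank]
    exact PySem.Dict.items_foldl_insert_fresh (l := PySem.List.enumerate order)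
      (k := fun q => q.2) (v := fun q => q.1) (d := PySem.Dict.empty)
      (by intro a _; simp) (by rw [PySem.List.map_snd_enumerate]; exact hnd)
  have hkeys : rank.keys = order := by
    show rank.items.map (·.1) = order
    rw [hitems, List.map_map]
    have : ((fun (q : Int × Int) => q.1) ∘ (fun (q : Int × Int) => (q.2, q.1))) = (fun (q : Int × Int) => q.2) := rfl
    rw [this, PySem.List.map_snd_enumerate]
  obtain ⟨hklt, hkv, _⟩ := PySem.List.getElem_of_index?_eq_some hj
  have hmemit : (s, (j : Int)) ∈ rank.items := by
    rw [hitems]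
    refine List.mem_map.2 ⟨((j : Int), s), ?_, rfl⟩
    exact (PySem.List.mem_enumerate_iff order 0 (((j:Int)), s)).2 ⟨j, hklt, by simp [hkv]⟩
  exact PySem.Dict.get?_of_mem_items rank hmemit (by rw [hkeys]; exact hnd)

-- ===== VERDICT (by name: the statement is the Claim_ definition above) =====
theorem serve_accesses_spec : Claim_equal_serve_accesses := by
  intro sequence working_list _ hpre
  unfold Spec_serve_accesses serve_accesses serve_accesses_alt
  dsimp only
  set mc := PySem.List.sorted (PySem.Dict.counter sequence).items (fun p => p.2) true with hmc
  have hperm : mc.Perm (PySem.Dict.counter sequence).items := PySem.List.sorted_perm _ _ _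
  have hkeys_eq : (PySem.Dict.counter sequence).keys = PySem.Set.ofList sequence :=
    PySem.Dict.keys_counter sequence
  have hpermk : (mc.map (·.1)).Perm (PySem.Set.ofList sequence) := by
    have := hperm.map (·.1)
    rwa [show ((PySem.Dict.counter sequence).items.map (·.1)) = (PySem.Dict.counter sequence).keys from rfl,
      hkeys_eq] at this
  have hnd : (mc.map (·.1)).Nodup := hpermk.nodup_iff.2 (PySem.Set.nodup_ofList sequence)
  have hmemk : ∀ s ∈ sequence, s ∈ mc.map (·.1) := by
    intro s hs
    exact hpermk.mem_iff.2 ((PySem.Set.mem_ofList sequence s).2 hs)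
  have hkin : ∀ p ∈ mc, p.1 ∈ working_list := by
    intro p hp
    have h1 : p.1 ∈ mc.map (·.1) := List.mem_map.2 ⟨p, hp, rfl⟩
    exact hpre _ ((PySem.Set.mem_ofList sequence p.1).1 (hpermk.mem_iff.1 h1))
  have hfps : (mc.map (·.1)).map (fpIntB working_list) = mc.map (fun p => fpIntB working_list p.1) := by
    rw [List.map_map]
    rfl
  -- first positions of distinct promoted items are distinct
  have hndf : (mc.map (fun p => fpIntB working_list p.1)).Nodup := by
    rw [← hfps]
    refine hnd.map_on ?_
    intro t ht t' ht' he
    have htw : t ∈ working_list := by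
      obtain ⟨p, hp, rfl⟩ := List.mem_map.1 ht
      exact hkin p hp
    have htw' : t' ∈ working_list := by
      obtain ⟨p, hp, rfl⟩ := List.mem_map.1 ht'
      exact hkin p hp
    obtain ⟨g, hg⟩ := Option.isSome_iff_exists.1
      ((PySem.List.index?_isSome_iff (xs := working_list) (v := t)).2 htw)
    obtain ⟨g', hg'⟩ := Option.isSome_iff_exists.1
      ((PySem.List.index?_isSome_iff (xs := working_list) (v := t')).2 htw')
    have he1 : fpIntB working_list t = (g : Int) := by unfold fpIntB; rw [hg]
    have he2 : fpIntB working_list t' = (g' : Int) := by unfold fpIntB; rw [hg']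
    rw [he1, he2] at he
    have hgg : g = g' := by exact_mod_cast he
    subst hgg
    obtain ⟨hlt, hv, _⟩ := PySem.List.getElem_of_index?_eq_some hg
    obtain ⟨hlt', hv', _⟩ := PySem.List.getElem_of_index?_eq_some hg'
    rw [← hv, ← hv']
  -- closed form of A's reorder phase
  have hclosed := stepB_closed working_list mc [] [] 0 (by simp) (by simp)
    hkin (by intro p _; simp) hndf
  rw [fpos_nil] at hclosed
  simp only [List.nil_append] at hclosed
  have hAB := loopAB mc [] working_list 0 hnd (by intro p _; simp)
    (by intro p hp; simpa using hkin p hp)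
  rw [show ([] : List Int) ++ working_list = working_list from rfl] at hAB
  rw [show ((([] : List Int)).length : Int) = 0 from rfl] at hAB
  obtain ⟨hfold, _⟩ := hAB
  rw [hfold, hclosed, hfps]
  dsimp only
  -- B's positional tail equals the loop's remaining list
  have htail : ((PySem.List.enumerate working_list).filter
        (fun q => !(PySem.Set.contains (PySem.Set.ofList (mc.map (fun p => fpIntB working_list p.1))) q.1))).map (·.2)
      = fpos (mc.map (fun p => fpIntB working_list p.1)) 0 working_list := by
    rw [tail_fpos]
    exact fpos_congr _ _ (fun k => PySem.Set.mem_ofList _ k) 0 working_list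
  rw [htail]
  simp only [zero_add]
  -- access phase: the two loop bodies agree on every element of sequence
  set order := mc.map (·.1) with horder
  set tailL := fpos (mc.map (fun p => fpIntB working_list p.1)) 0 working_list with htaildef
  set rank := (PySem.List.enumerate order).foldl (fun d q => d.insert q.2 q.1) PySem.Dict.empty with hrank
  have hacc : ∀ (st : Int × List Int), ∀ s ∈ sequence,
      accA (order ++ tailL) st s = accB rank st s := by
    intro st s hs
    have hso : s ∈ order := hmemk s hs
    obtain ⟨j, hj⟩ : ∃ j, PySem.List.index? order s = some j :=
      Option.isSome_iff_exists.1 ((PySem.List.index?_isSome_iff order s).2 hso)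
    have hidxfull : PySem.List.index? (order ++ tailL) s = some j := by
      rw [PySem.List.index?_append_of_mem _ hso, hj]
    have hg := rank_get order hnd s j hj
    rw [← hrank] at hg
    have hidxfull' : List.idxOf? s (order ++ tailL) = some j := by
      rw [← PySem.List.index?_eq_idxOf?]
      exact hidxfull
    simp [accA, accB, hidxfull', hg]
  have hfoldacc := PySem.List.foldl_congr_mem sequence (accA (order ++ tailL)) (accB rank)
    (((mc.map (fun p => fpIntB working_list p.1)).foldl costStep (0, [])).1,
      [((mc.map (fun p => fpIntB working_list p.1)).foldl costStep (0, [])).1])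
    (fun acc x hx => hacc acc x hx)
  rw [hfoldacc]
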